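-- pv_equiv track=rewrite | github.com/skornel02/szte-IB370G-2023-1 | hazi3/feladat.py | hogolyo_csata
-- ===== SOURCE A (Python) =====
-- def hogolyo_csata(korok):
--     osszesitett = {}
--
--     for players in korok:
--         for player in players.keys():
--             if player in osszesitett.keys():
--                 osszesitett[player]['eldobott_hogolyok'] += players[player][
--                     'eldobott_hogolyok'] if 'eldobott_hogolyok' in players[player].keys() else 0
--                 osszesitett[player]['talalt'] += players[player][
--                     'talalt'] if 'talalt' in players[player].keys() else 0
--                 osszesitett[player]['fejtalalat'] += players[player][
--                     'fejtalalat'] if 'fejtalalat' in players[player].keys() else 0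
--             else:
--                 osszesitett[player] = {
--                     'eldobott_hogolyok': players[player]['eldobott_hogolyok'] if 'eldobott_hogolyok' in players[player].keys() else 0,
--                     'talalt': players[player]['talalt'] if 'talalt' in players[player].keys() else 0,
--                     'fejtalalat': players[player]['fejtalalat'] if 'fejtalalat' in players[player].keys() else 0,
--                 }
--
--     return osszesitett
-- ===== SOURCE B (Python) =====
-- def hogolyo_csata(korok):
--     fields = ('eldobott_hogolyok', 'talalt', 'fejtalalat')
--     players = list(dict.fromkeys(p for kor in korok for p in kor))
--     return {
--         p: {f: sum(kor[p].get(f, 0) for kor in korok if p in kor) for f in fields}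
--         for p in players
--     }
-- ===== Notes on version B (the rewrite author's own statement) =====
-- stated objective: alternative
-- what changed: Replaced A's single incremental accumulate-into-a-dict pass with two staged passes: first build the player list in first-appearance order via dict.fromkeys, then compute each player's three field totals by a per-player sum that rescans the rounds.
import Mathlib
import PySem

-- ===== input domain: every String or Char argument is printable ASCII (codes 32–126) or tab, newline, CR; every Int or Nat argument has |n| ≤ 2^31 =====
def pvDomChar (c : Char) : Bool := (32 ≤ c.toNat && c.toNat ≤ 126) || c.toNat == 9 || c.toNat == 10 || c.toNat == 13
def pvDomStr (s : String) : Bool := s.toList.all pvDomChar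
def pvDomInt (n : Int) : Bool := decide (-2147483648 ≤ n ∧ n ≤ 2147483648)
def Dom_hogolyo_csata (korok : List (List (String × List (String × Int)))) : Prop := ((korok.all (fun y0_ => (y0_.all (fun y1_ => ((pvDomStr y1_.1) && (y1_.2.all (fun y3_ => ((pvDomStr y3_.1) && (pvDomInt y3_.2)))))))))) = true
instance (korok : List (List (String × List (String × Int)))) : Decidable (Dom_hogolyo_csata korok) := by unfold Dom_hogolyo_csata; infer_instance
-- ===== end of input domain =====

-- B replaces A's single incremental accumulate-into-a-dict pass by two staged passes: first the
-- player list in order of first appearance (dict.fromkeys), then a per-player/per-field sum that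
-- rescans the rounds; objective: alternative (same result by a different traversal).

-- ===== PORT A =====

-- players[player][f] if f in players[player].keys() else 0
def pvStat (pl : List (String × Int)) (f : String) : Int :=
  if (PySem.Dict.mk pl).contains f then (PySem.Dict.mk pl).getD f 0 else 0

-- one iteration of A's inner loop: 'player' handled against accumulator 'o'
-- (Python's '+=' indexes keys that are always present, so modify's default 0 is never consulted)
def pvStepA (players : List (String × List (String × Int)))
    (o : PySem.Dict String (PySem.Dict String Int)) (player : String) :
    PySem.Dict String (PySem.Dict String Int) :=
  let pl := (PySem.Dict.mk players).getD player []
  let e := pvStat pl "eldobott_hogolyok"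
  let t := pvStat pl "talalt"
  let fj := pvStat pl "fejtalalat"
  if o.contains player then
    o.modify player PySem.Dict.empty (fun inner =>
      ((inner.modify "eldobott_hogolyok" 0 (· + e)).modify "talalt" 0 (· + t)).modify
        "fejtalalat" 0 (· + fj))
  else
    o.insert player (PySem.Dict.mk
      [("eldobott_hogolyok", e), ("talalt", t), ("fejtalalat", fj)])

def hogolyo_csata (korok : List (List (String × List (String × Int)))) :
    List (String × List (String × Int)) :=
  let osszesitett : PySem.Dict String (PySem.Dict String Int) :=
    korok.foldl (fun o players =>
      (players.map Prod.fst).foldl (pvStepA players) o) PySem.Dict.empty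
  osszesitett.items.map (fun p => (p.1, p.2.items))

-- ===== PORT B =====

def pvFields : List String := ["eldobott_hogolyok", "talalt", "fejtalalat"]

-- sum(kor[p].get(f, 0) for kor in korok if p in kor)
def pvSum (korok : List (List (String × List (String × Int)))) (p f : String) : Int :=
  korok.foldl (fun s kor =>
    if (PySem.Dict.mk kor).contains p then
      s + (PySem.Dict.mk ((PySem.Dict.mk kor).getD p [])).getD f 0
    else s) 0

def hogolyo_csata_alt (korok : List (List (String × List (String × Int)))) :
    List (String × List (String × Int)) :=
  -- players = list(dict.fromkeys(p for kor in korok for p in kor))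
  let players := PySem.List.dedup (korok.flatMap (fun kor => kor.map Prod.fst))
  players.map (fun p => (p, pvFields.map (fun f => (f, pvSum korok p f))))

-- ===== PRECONDITION & SPEC =====
-- Pre_ only states that each round's association list represents a Python dict (no duplicate
-- player keys) — automatic for every real Python input, where A's key iteration plus first-match
-- lookup and B's per-player lookups necessarily coincide.
def Pre_hogolyo_csata (korok : List (List (String × List (String × Int)))) : Prop :=
  ∀ players ∈ korok, (players.map Prod.fst).Nodup

instance (korok : List (List (String × List (String × Int)))) :
    Decidable (Pre_hogolyo_csata korok) := by unfold Pre_hogolyo_csata; infer_instance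

def pvWitness_hogolyo_csata : (List (List (String × List (String × Int)))) :=
  [[("anna", [("eldobott_hogolyok", 3), ("talalt", 1)])],
   [("anna", [("fejtalalat", 2)]), ("bela", [])]]

def Spec_hogolyo_csata (korok : List (List (String × List (String × Int))))
    (out : List (String × List (String × Int))) : Prop := out = hogolyo_csata_alt korok
instance (korok : List (List (String × List (String × Int))))
    (out : List (String × List (String × Int))) : Decidable (Spec_hogolyo_csata korok out) := by
  unfold Spec_hogolyo_csata; infer_instance

-- ===== CLAIM (what is proved, stated in full; the proofs are below) =====
def Claim_equal_hogolyo_csata : Prop := ∀ (korok : List (List (String × List (String × Int)))), Dom_hogolyo_csata korok → Pre_hogolyo_csata korok → Spec_hogolyo_csata korok (hogolyo_csata korok)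

-- ===== LEMMAS AND PROOFS =====

-- proof-only abbreviations: the value of field f in a stats dict, and the total contributed to
-- (player p, field f) by a flat list of (player, stats) pairs
def pvVal (st : List (String × Int)) (f : String) : Int := (PySem.Dict.mk st).getD f 0

def pvFlatS (l : List (String × List (String × Int))) (p f : String) : Int :=
  ((l.filter (fun ps => ps.1 == p)).map (fun ps => pvVal ps.2 f)).sum

def pvInner (l : List (String × List (String × Int))) (p : String) : PySem.Dict String Int :=
  PySem.Dict.mk (pvFields.map (fun f => (f, pvFlatS l p f)))

-- A's per-player step with the round lookup already resolved to the pair itself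
def pvStepF (o : PySem.Dict String (PySem.Dict String Int))
    (ps : String × List (String × Int)) : PySem.Dict String (PySem.Dict String Int) :=
  let e := pvVal ps.2 "eldobott_hogolyok"
  let t := pvVal ps.2 "talalt"
  let fj := pvVal ps.2 "fejtalalat"
  if o.contains ps.1 then
    o.modify ps.1 PySem.Dict.empty (fun inner =>
      ((inner.modify "eldobott_hogolyok" 0 (· + e)).modify "talalt" 0 (· + t)).modify
        "fejtalalat" 0 (· + fj))
  else
    o.insert ps.1 (PySem.Dict.mk
      [("eldobott_hogolyok", e), ("talalt", t), ("fejtalalat", fj)])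

theorem pv_items_mk {κ ν : Type} (ps : List (κ × ν)) : (PySem.Dict.mk ps).items = ps := rfl

theorem pv_stat_eq (pl : List (String × Int)) (f : String) :
    pvStat pl f = (PySem.Dict.mk pl).getD f 0 := by
  unfold pvStat
  by_cases h : (PySem.Dict.mk pl).contains f
  · simp [h]
  · simp [h, PySem.Dict.getD_of_not_contains _ 0 (eq_false_of_ne_true h)]

theorem pv_step_eq (players : List (String × List (String × Int)))
    (hnd : (players.map Prod.fst).Nodup)
    (ps : String × List (String × Int)) (hmem : ps ∈ players)
    (o : PySem.Dict String (PySem.Dict String Int)) :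
    pvStepA players o ps.1 = pvStepF o ps := by
  have hlk : (PySem.Dict.mk players).getD ps.1 [] = ps.2 :=
    PySem.Dict.getD_of_mem_items _ (by simpa using hmem) (by simpa [PySem.Dict.keys] using hnd) []
  unfold pvStepA pvStepF
  simp only [hlk, pv_stat_eq, pvVal]

theorem pv_dedup_append (m : List String) (q : String) :
    PySem.List.dedup (m ++ [q]) =
      if q ∈ m then PySem.List.dedup m else PySem.List.dedup m ++ [q] := by
  simp only [PySem.List.dedup_eq_ofList, PySem.Set.ofList_eq_foldl, List.foldl_append,
    List.foldl_cons, List.foldl_nil, PySem.Set.add]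
  have hmem : (List.foldl PySem.Set.add [] m).contains q = decide (q ∈ m) := by
    rw [← PySem.Set.ofList_eq_foldl]
    by_cases h : q ∈ m
    · simp [h, (PySem.Set.mem_ofList m q).2 h]
    · simp [h]
  rw [hmem]
  by_cases h : q ∈ m <;> simp [h]

theorem pv_flatS_append (l : List (String × List (String × Int)))
    (x : String × List (String × Int)) (p f : String) :
    pvFlatS (l ++ [x]) p f = pvFlatS l p f + (if x.1 = p then pvVal x.2 f else 0) := by
  simp only [pvFlatS, List.filter_append, List.map_append, List.sum_append]
  by_cases h : x.1 = p <;> simp [h]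

theorem pv_flatS_of_not_mem (l : List (String × List (String × Int))) (p f : String)
    (h : p ∉ l.map Prod.fst) : pvFlatS l p f = 0 := by
  have : l.filter (fun ps => ps.1 == p) = [] := by
    apply List.filter_eq_nil_iff.2
    intro ps hps hbeq
    have h1 : ps.1 ∈ l.map Prod.fst := List.mem_map_of_mem hps
    exact h (eq_of_beq hbeq ▸ h1)
  simp [pvFlatS, this]

-- the triple-modify of A's update branch on a literal three-field dict
theorem pv_add_triple (a b c e t fj : Int) :
    (((PySem.Dict.mk [("eldobott_hogolyok", a), ("talalt", b), ("fejtalalat", c)]).modify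
        "eldobott_hogolyok" 0 (· + e)).modify "talalt" 0 (· + t)).modify
      "fejtalalat" 0 (· + fj) =
    PySem.Dict.mk [("eldobott_hogolyok", a + e), ("talalt", b + t), ("fejtalalat", c + fj)] := by
  simp [PySem.Dict.modify, PySem.Dict.insert, PySem.Dict.getD, PySem.Dict.get?,
    PySem.Dict.contains]

theorem pv_inner_eq (l : List (String × List (String × Int))) (p : String) :
    pvInner l p = PySem.Dict.mk [("eldobott_hogolyok", pvFlatS l p "eldobott_hogolyok"),
      ("talalt", pvFlatS l p "talalt"), ("fejtalalat", pvFlatS l p "fejtalalat")] := rfl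

-- main invariant: A's flat fold builds exactly the first-appearance keyed table of sums
theorem pv_main (l : List (String × List (String × Int))) :
    l.foldl pvStepF PySem.Dict.empty =
      PySem.Dict.mk ((PySem.List.dedup (l.map Prod.fst)).map (fun p => (p, pvInner l p))) := by
  induction l using List.reverseRecOn with
  | nil => rfl
  | append_singleton l x ih =>
    rw [List.foldl_append, List.foldl_cons, List.foldl_nil, ih]
    set K := PySem.List.dedup (l.map Prod.fst) with hK
    have hkeys : (PySem.Dict.mk (K.map (fun p => (p, pvInner l p)))).keys = K := by
      simp [PySem.Dict.keys_mk, List.map_map, Function.comp_def]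
    have hknd : K.Nodup := PySem.List.nodup_dedup _
    have hcontains : (PySem.Dict.mk (K.map (fun p => (p, pvInner l p)))).contains x.1
        = decide (x.1 ∈ l.map Prod.fst) := by
      rw [PySem.Dict.contains_eq_decide_mem_keys, hkeys, hK]
      simp only [decide_eq_decide]
      exact PySem.List.mem_dedup _ _
    simp only [List.map_append, List.map_cons, List.map_nil]
    rw [pv_dedup_append]
    by_cases hq : x.1 ∈ l.map Prod.fst
    · -- update branch: the key is already present, its entry gets the three sums added
      simp only [hq, if_true]
      unfold pvStepF
      rw [hcontains]
      simp only [hq, decide_true, if_true]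
      have hgetD : (PySem.Dict.mk (K.map (fun p => (p, pvInner l p)))).getD x.1 PySem.Dict.empty
          = pvInner l x.1 := by
        apply PySem.Dict.getD_of_mem_items
        · exact List.mem_map_of_mem ((PySem.List.mem_dedup _ _).2 hq)
        · rw [hkeys]; exact hknd
      rw [PySem.Dict.modify, hgetD]
      apply PySem.Dict.ext
      rw [PySem.Dict.items_insert_of_contains _ _ (by rw [hcontains]; simp [hq])]
      rw [pv_items_mk, pv_items_mk, List.map_map]
      apply List.map_congr_left
      intro p hp
      by_cases hpq : p = x.1
      · simp only [Function.comp_apply, hpq, beq_self_eq_true, if_true]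
        rw [pv_inner_eq l x.1, pv_add_triple, pv_inner_eq (l ++ [x]) x.1]
        simp [pv_flatS_append]
      · have hbeq : (p == x.1) = false := by simp [hpq]
        have hxp : x.1 ≠ p := fun h => hpq h.symm
        simp only [Function.comp_apply, hbeq, if_false, Bool.false_eq_true]
        have : pvInner (l ++ [x]) p = pvInner l p := by
          rw [pv_inner_eq, pv_inner_eq]
          simp [pv_flatS_append, hxp]
        rw [this]
    · -- insert branch: a fresh key is appended with exactly this round's values
      simp only [hq, if_false]
      unfold pvStepF
      rw [hcontains]
      simp only [hq, decide_false, Bool.false_eq_true, if_false]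
      apply PySem.Dict.ext
      rw [PySem.Dict.items_insert_of_not_contains _ _ (by rw [hcontains]; simp [hq])]
      rw [pv_items_mk, pv_items_mk, List.map_append, List.map_cons, List.map_nil]
      congr 1
      · apply List.map_congr_left
        intro p hp
        have hpl : p ∈ l.map Prod.fst := (PySem.List.mem_dedup _ _).1 hp
        have hpq : x.1 ≠ p := fun h => hq (h ▸ hpl)
        have : pvInner (l ++ [x]) p = pvInner l p := by
          rw [pv_inner_eq, pv_inner_eq]
          simp [pv_flatS_append, hpq]
        rw [this]
      · have : pvInner (l ++ [x]) x.1 = PySem.Dict.mk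
            [("eldobott_hogolyok", pvVal x.2 "eldobott_hogolyok"),
             ("talalt", pvVal x.2 "talalt"), ("fejtalalat", pvVal x.2 "fejtalalat")] := by
          rw [pv_inner_eq]
          simp [pv_flatS_append, pv_flatS_of_not_mem l _ _ hq]
        rw [this]

-- with unique keys, the entries of key p in a round are exactly the one looked up
theorem pv_filter_key_eq (kor : List (String × List (String × Int))) (p : String)
    (st : List (String × Int)) (hmem : (p, st) ∈ kor) (hnd : (kor.map Prod.fst).Nodup) :
    kor.filter (fun ps => ps.1 == p) = [(p, st)] := by
  induction kor with
  | nil => cases hmem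
  | cons y t ih =>
    rw [List.map_cons, List.nodup_cons] at hnd
    rcases List.mem_cons.1 hmem with h | h
    · subst h
      simp only [List.filter_cons, beq_self_eq_true, if_true]
      congr 1
      apply List.filter_eq_nil_iff.2
      intro ps hps hbeq
      have h1 : ps.1 ∈ t.map Prod.fst := List.mem_map_of_mem hps
      exact hnd.1 (eq_of_beq hbeq ▸ h1)
    · have hy : (y.1 == p) = false := by
        have hpmem : p ∈ t.map Prod.fst := List.mem_map_of_mem h
        simp only [beq_eq_false_iff_ne, ne_eq]
        exact fun he => hnd.1 (he ▸ hpmem)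
      simp only [List.filter_cons, hy, Bool.false_eq_true, if_false]
      exact ih h hnd.2

-- a round's contribution in B's per-player sum equals its flat contribution
theorem pv_round (kor : List (String × List (String × Int)))
    (hnd : (kor.map Prod.fst).Nodup) (p f : String) :
    (if (PySem.Dict.mk kor).contains p then
        (PySem.Dict.mk ((PySem.Dict.mk kor).getD p [])).getD f 0 else 0)
      = pvFlatS kor p f := by
  by_cases hc : (PySem.Dict.mk kor).contains p
  · have hpk : p ∈ kor.map Prod.fst := by
      have := (PySem.Dict.contains_iff_mem_keys _ _).1 hc
      simpa [PySem.Dict.keys_mk] using this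
    obtain ⟨ps, hps, hfst⟩ := List.mem_map.1 hpk
    obtain ⟨q, st⟩ := ps
    cases hfst
    have hget : (PySem.Dict.mk kor).getD q [] = st :=
      PySem.Dict.getD_of_mem_items _ hps (by simpa [PySem.Dict.keys_mk] using hnd) []
    rw [if_pos hc, hget, pvFlatS, pv_filter_key_eq kor q st hps hnd]
    simp [pvVal]
  · have hpk : p ∉ kor.map Prod.fst := by
      intro h
      exact hc ((PySem.Dict.contains_iff_mem_keys _ _).2 (by simpa [PySem.Dict.keys_mk] using h))
    rw [if_neg hc, pv_flatS_of_not_mem kor p f hpk]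

-- B's staged per-player sum equals the flat-list sum
theorem pv_sum_eq (korok : List (List (String × List (String × Int))))
    (hpre : Pre_hogolyo_csata korok) (p f : String) :
    pvSum korok p f = pvFlatS korok.flatten p f := by
  unfold pvSum
  have h1 : korok.foldl (fun s kor =>
      if (PySem.Dict.mk kor).contains p then
        s + (PySem.Dict.mk ((PySem.Dict.mk kor).getD p [])).getD f 0
      else s) 0 = korok.foldl (fun s kor => s + pvFlatS kor p f) 0 := by
    apply PySem.List.foldl_congr_mem
    intro s kor hmem
    rw [← pv_round kor (hpre kor hmem) p f]
    by_cases hc : (PySem.Dict.mk kor).contains p <;> simp [hc]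
  rw [h1, PySem.List.foldl_add]
  simp only [zero_add, pvFlatS, List.filter_flatten, List.map_flatten, List.sum_flatten,
    List.map_map]
  rfl

-- ===== VERDICT (by name: the statement is the Claim_ definition above) =====
theorem hogolyo_csata_spec : Claim_equal_hogolyo_csata := by
  intro korok _ hpre
  unfold Spec_hogolyo_csata hogolyo_csata hogolyo_csata_alt
  dsimp only
  have h1 : korok.foldl (fun o players =>
        (players.map Prod.fst).foldl (pvStepA players) o) PySem.Dict.empty
      = korok.flatten.foldl pvStepF PySem.Dict.empty := by
    rw [List.foldl_flatten]
    apply PySem.List.foldl_congr_mem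
    intro o players hmem
    rw [List.foldl_map]
    exact PySem.List.foldl_congr_mem _ _ _ _ (fun acc ps hps =>
      pv_step_eq players (hpre players hmem) ps hps acc)
  rw [h1, pv_main, pv_items_mk, List.map_map]
  have h2 : korok.flatMap (fun kor => kor.map Prod.fst) = korok.flatten.map Prod.fst := by
    simp [List.map_flatten, List.flatMap_def]
  rw [h2]
  apply List.map_congr_left
  intro p hp
  simp only [Function.comp_apply]
  congr 1
  rw [pv_inner_eq, pv_items_mk]
  simp [pvFields, pv_sum_eq korok hpre p]
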